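-- pv_equiv track=rewrite | github.com/singjyo/Ex-HGNN | utils.py | modify_repeating_letters
-- ===== SOURCE A (Python) =====
-- def modify_repeating_letters(lst):
--     """
--     input  :  ['A', 'P', 'A']
--     output :  ['A', 'P', 'A;']
--
--     input  : ['B', 'F', 'C', 'F', 'B']
--     output : ['B', 'F', 'C', 'F;', 'B;']
--     """
--
--     seen = set()  # Set to keep track of seen letters
--     result = []   # Result list
--
--     for item in lst:
--         if item in seen:
--             result.append(f"{item};")  # Append a semicolon if the item is repeating
--         else:
--             result.append(item)
--             seen.add(item)  # Mark this item as seen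
--
--     return result
-- ===== SOURCE B (Python) =====
-- def modify_repeating_letters(lst):
--     pending = [(x, False) for x in lst]
--     out = []
--     while pending:
--         h, m = pending[0]
--         out.append(h + ";" if m else h)
--         pending = [(x, m2 or x == h) for (x, m2) in pending[1:]]
--     return out
-- ===== Notes on version B (the rewrite author's own statement) =====
-- stated objective: alternative
-- what changed: Replaces the single pass with an incremental 'seen' set by a mark-propagation loop that keeps no lookup structure: each element carries a boolean mark, and after emitting the head the whole remainder is rewritten, marking every later occurrence of the head; an element gets ';' exactly when an earlier head marked it.
import Mathlib
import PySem

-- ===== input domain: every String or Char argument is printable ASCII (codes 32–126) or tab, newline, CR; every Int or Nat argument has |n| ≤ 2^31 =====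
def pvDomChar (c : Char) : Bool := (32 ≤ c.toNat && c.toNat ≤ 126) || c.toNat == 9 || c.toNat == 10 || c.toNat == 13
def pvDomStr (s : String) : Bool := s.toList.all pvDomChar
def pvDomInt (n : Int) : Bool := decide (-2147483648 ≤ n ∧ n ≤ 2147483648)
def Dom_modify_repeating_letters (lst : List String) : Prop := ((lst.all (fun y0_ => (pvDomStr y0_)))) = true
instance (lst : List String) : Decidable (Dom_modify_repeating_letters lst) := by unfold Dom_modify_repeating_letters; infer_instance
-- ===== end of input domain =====

-- B replaces A's 'seen'-set pass by a mark-propagation loop over (element, mark) pairs with no lookup structure (alternative algorithm, not faster).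

-- ===== PORT A =====
-- A: one pass with a `seen` set and an accumulating result list.
def modify_repeating_letters (lst : List String) : List String :=
  (lst.foldl
    (fun (st : PySem.Set String × List String) item =>
      if PySem.Set.contains st.1 item then (st.1, st.2 ++ [item ++ ";"])
      else (PySem.Set.add st.1 item, st.2 ++ [item]))
    (PySem.Set.empty, [])).2

-- ===== PORT B =====
-- B: Source B's while-loop over `pending` as recursion; each element holds a boolean mark, and
-- after emitting the head every later occurrence of the head in the remainder is marked.
def mrlGo : List (String × Bool) → List String
  | [] => []
  | (h, m) :: rest =>
      (if m then h ++ ";" else h) ::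
        mrlGo (rest.map (fun p => (p.1, p.2 || (p.1 == h))))
termination_by xs => xs.length
decreasing_by simp

def modify_repeating_letters_alt (lst : List String) : List String :=
  mrlGo (lst.map (fun x => (x, false)))

-- ===== PRECONDITION & SPEC =====
def Spec_modify_repeating_letters (lst : List String) (out : List String) : Prop := out = modify_repeating_letters_alt lst
instance (lst : List String) (out : List String) : Decidable (Spec_modify_repeating_letters lst out) := by unfold Spec_modify_repeating_letters; infer_instance

-- ===== CLAIM (what is proved, stated in full; the proofs are below) =====
def Claim_equal_modify_repeating_letters : Prop := ∀ (lst : List String), Dom_modify_repeating_letters lst → Spec_modify_repeating_letters lst (modify_repeating_letters lst)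

-- ===== LEMMAS AND PROOFS =====

theorem mrl_contains_add (s : PySem.Set String) (x y : String) :
    PySem.Set.contains (PySem.Set.add s x) y = (PySem.Set.contains s y || y == x) := by
  by_cases hy : y ∈ PySem.Set.add s x
  · rcases (PySem.Set.mem_add s x y).1 hy with h | h
    · simp [PySem.Set.contains, hy, h]
    · simp [PySem.Set.contains, hy, h]
  · have h1 : y ∉ s := fun h => hy ((PySem.Set.mem_add s x y).2 (Or.inl h))
    have h2 : y ≠ x := fun h => hy ((PySem.Set.mem_add s x y).2 (Or.inr h))
    simp [PySem.Set.contains, hy, h1, h2]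

theorem mrl_aux (suf : List String) :
    ∀ (s : PySem.Set String) (acc : List String),
    (suf.foldl
      (fun (st : PySem.Set String × List String) item =>
        if PySem.Set.contains st.1 item then (st.1, st.2 ++ [item ++ ";"])
        else (PySem.Set.add st.1 item, st.2 ++ [item]))
      (s, acc)).2 =
    acc ++ mrlGo (suf.map (fun x => (x, PySem.Set.contains s x))) := by
  induction suf with
  | nil => intro s acc; simp [mrlGo]
  | cons h t ih =>
    intro s acc
    rw [List.map_cons, List.foldl_cons, mrlGo, List.map_map]
    by_cases hc : PySem.Set.contains s h = true
    · rw [if_pos hc, if_pos hc, ih]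
      have hm : List.map ((fun p : String × Bool => (p.1, p.2 || (p.1 == h))) ∘
            fun x => (x, PySem.Set.contains s x)) t =
          List.map (fun x => (x, PySem.Set.contains s x)) t := by
        apply List.map_congr_left
        intro x _
        simp only [Function.comp]
        by_cases hx : x == h
        · have hxh : x = h := eq_of_beq hx
          have hmem : h ∈ s := by simpa [PySem.Set.contains] using hc
          simp [hxh, hmem]
        · simp [hx]
      rw [hm]
      simp
    · rw [if_neg hc, if_neg hc, ih]
      have hm : List.map ((fun p : String × Bool => (p.1, p.2 || (p.1 == h))) ∘
            fun x => (x, PySem.Set.contains s x)) t =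
          List.map (fun x => (x, PySem.Set.contains (PySem.Set.add s h) x)) t := by
        apply List.map_congr_left
        intro x _
        simp only [Function.comp, mrl_contains_add]
      rw [hm]
      simp

-- ===== VERDICT (by name: the statement is the Claim_ definition above) =====
theorem modify_repeating_letters_spec : Claim_equal_modify_repeating_letters := by
  intro lst _
  unfold Spec_modify_repeating_letters modify_repeating_letters modify_repeating_letters_alt
  have := mrl_aux lst PySem.Set.empty []
  simpa [PySem.Set.contains, PySem.Set.empty] using this
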